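-- pv_equiv track=rewrite | github.com/CuriousCI/university | python/homework/4-required/ph04v2.py | process
-- ===== SOURCE A (Python) =====
-- def process(words):
--     dicts = []
--     len_dicts = 0
--
--     for word in words:
--         for curr_pos, char in enumerate(word):
--             if curr_pos < len_dicts:
--                 curr_dict = dicts[curr_pos]
--                 curr_dict[char] = curr_dict.get(char, 0)+1
--             else:
--                 dicts.append({char: 1})
--
--                 len_dicts += 1
--     return dicts
-- ===== SOURCE B (Python) =====
-- def process(words):
--     # Column-major: one frequency dict per position, built independently.
--     n = 0
--     for w in words:
--         if len(w) > n:
--             n = len(w)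
--     result = []
--     for p in range(n):
--         counts = {}
--         for w in words:
--             if p < len(w):
--                 ch = w[p]
--                 counts[ch] = counts.get(ch, 0) + 1
--         result.append(counts)
--     return result
-- ===== Notes on version B (the rewrite author's own statement) =====
-- stated objective: alternative
-- what changed: B counts column-major: it computes the maximum word length once and then builds each position's frequency dict independently by a single pass over the words, instead of A's row-major loop that grows and mutates a list of dicts while scanning each word's characters.
import Mathlib
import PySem

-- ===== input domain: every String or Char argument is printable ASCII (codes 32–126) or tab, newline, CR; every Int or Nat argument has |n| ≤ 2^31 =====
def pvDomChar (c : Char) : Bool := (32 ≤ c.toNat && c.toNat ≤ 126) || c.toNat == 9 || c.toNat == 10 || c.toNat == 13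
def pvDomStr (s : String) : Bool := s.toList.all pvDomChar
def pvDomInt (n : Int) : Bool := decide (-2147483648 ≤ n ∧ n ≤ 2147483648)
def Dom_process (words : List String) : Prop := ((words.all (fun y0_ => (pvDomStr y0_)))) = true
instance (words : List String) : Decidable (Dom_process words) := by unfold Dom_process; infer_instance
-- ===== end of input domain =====

-- B counts column-major (one frequency dict per position, each by its own pass over the
-- words) instead of A's row-major loop that grows/mutates a list of dicts; equal results proved.


-- ===== PORT A =====
-- iterating a Python string yields 1-character strings; those are the dict keys
def keyOf (c : Char) : String := String.mk [c]

-- `curr_dict[char] = curr_dict.get(char, 0) + 1` (shared expression of both Pythons)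
def bump (d : PySem.Dict String Int) (c : Char) : PySem.Dict String Int :=
  d.insert (keyOf c) (d.getD (keyOf c) 0 + 1)

-- one step of A's inner loop; `len_dicts` in A always equals `len(dicts)`, so the
-- port tracks only `dicts` (the Python keeps the counter in sync with every append)
def aStep (dicts : List (PySem.Dict String Int)) (pc : Int × Char) :
    List (PySem.Dict String Int) :=
  if pc.1 < (dicts.length : Int) then
    PySem.List.pySetD dicts pc.1
      (bump (PySem.List.pyGetD dicts pc.1 PySem.Dict.empty) pc.2)
  else
    dicts ++ [PySem.Dict.ofList [(keyOf pc.2, 1)]]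

def process (words : List String) : List (List (String × Int)) :=
  (words.foldl (fun dicts word =>
      (PySem.List.enumerate word.toList 0).foldl aStep dicts) []).map PySem.Dict.items

-- ===== PORT B =====
-- B's first loop: n = max word length (0 for no words)
def maxLen (words : List String) : Nat :=
  words.foldl (fun n w => if w.toList.length > n then w.toList.length else n) 0

-- B's inner loop for one position p: frequency dict of the p-th column
-- (the index `p` is guarded in range, so the default of getD is never used)
def colDict (words : List String) (p : Nat) : PySem.Dict String Int :=
  words.foldl (fun counts w =>
      if p < w.toList.length then bump counts (w.toList.getD p 'A') else counts)
    PySem.Dict.empty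

def process_alt (words : List String) : List (List (String × Int)) :=
  ((List.range (maxLen words)).map (colDict words)).map PySem.Dict.items

-- ===== PRECONDITION & SPEC =====
def Spec_process (words : List String) (out : List (List (String × Int))) : Prop := out = process_alt words
instance (words : List String) (out : List (List (String × Int))) : Decidable (Spec_process words out) := by unfold Spec_process; infer_instance

-- ===== CLAIM (what is proved, stated in full; the proofs are below) =====
def Claim_equal_process : Prop := ∀ (words : List String), Dom_process words → Spec_process words (process words)

-- ===== LEMMAS AND PROOFS =====

lemma bump_empty (c : Char) :
    bump PySem.Dict.empty c = PySem.Dict.ofList [(keyOf c, 1)] := by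
  rfl

lemma map_getD_range {α : Type} (d : α) (xs : List α) :
    (List.range xs.length).map (fun p => xs.getD p d) = xs := by
  apply List.ext_getElem
  · simp
  · intro i h1 h2
    simp [List.getD_eq_getElem?_getD, List.getElem?_eq_getElem h2]

lemma getD_map_range {α : Type} (f : Nat → α) (d : α) (L p : Nat) :
    ((List.range L).map f).getD p d = if p < L then f p else d := by
  by_cases h : p < L <;>
    simp [List.getD_eq_getElem?_getD, List.getElem?_range, h, List.getElem?_eq_none_iff]

lemma aStep_getD (ds : List (PySem.Dict String Int)) (k : Nat) (c : Char)
    (hk : k ≤ ds.length) (p : Nat) :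
    (aStep ds ((k : Int), c)).getD p PySem.Dict.empty
    = if p = k then bump (ds.getD k PySem.Dict.empty) c
      else ds.getD p PySem.Dict.empty := by
  unfold aStep
  by_cases hlt : k < ds.length
  · simp only [show ((k:Int) < (ds.length:Int)) = True by simp [hlt], if_true,
      PySem.List.pySetD_natCast, PySem.List.pyGetD_natCast]
    by_cases hpk : p = k
    · subst hpk
      simp [List.getD_eq_getElem?_getD, List.getElem?_set, hlt]
    · simp [List.getD_eq_getElem?_getD, List.getElem?_set, hpk, Ne.symm hpk]
  · have hek : k = ds.length := by omega
    subst hek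
    simp only [show ((ds.length:Int) < (ds.length:Int)) = False by simp, if_false]
    by_cases hpk : p = ds.length
    · subst hpk
      have : ds.getD ds.length PySem.Dict.empty = PySem.Dict.empty := by
        simp [List.getD_eq_getElem?_getD, List.getElem?_eq_none_iff]
      simp [List.getD_eq_getElem?_getD, List.getElem?_append_right, this, bump_empty]
    · by_cases hp : p < ds.length
      · simp [List.getD_eq_getElem?_getD, List.getElem?_append_left hp, hpk]
      · have h1 : ds.getD p PySem.Dict.empty = PySem.Dict.empty := by
          rw [List.getD_eq_getElem?_getD, List.getElem?_eq_none (by omega)]; rfl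
        have h2 : (ds ++ [PySem.Dict.ofList [(keyOf c, 1)]]).getD p PySem.Dict.empty = PySem.Dict.empty := by
          rw [List.getD_eq_getElem?_getD, List.getElem?_eq_none (by simp; omega)]; rfl
        rw [if_neg hpk, h1, h2]

lemma aStep_length (ds : List (PySem.Dict String Int)) (k : Nat) (c : Char)
    (hk : k ≤ ds.length) :
    (aStep ds ((k : Int), c)).length = max ds.length (k + 1) := by
  unfold aStep
  by_cases hlt : k < ds.length
  · simp only [show ((k:Int) < (ds.length:Int)) = True by simp [hlt], if_true,
      PySem.List.pySetD_natCast, List.length_set]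
    omega
  · have hek : k = ds.length := by omega
    subst hek
    simp

lemma inner_eq (cs : List Char) : ∀ (k : Nat) (ds : List (PySem.Dict String Int)),
    k ≤ ds.length →
    (PySem.List.enumerate cs (k : Int)).foldl aStep ds
    = (List.range (max ds.length (k + cs.length))).map
        (fun p => if k ≤ p ∧ p - k < cs.length
                  then bump (ds.getD p PySem.Dict.empty) (cs.getD (p - k) 'A')
                  else ds.getD p PySem.Dict.empty) := by
  induction cs with
  | nil =>
      intro k ds hk
      rw [PySem.List.enumerate_nil, List.foldl_nil]
      simp only [List.length_nil, Nat.add_zero, Nat.max_eq_left hk, Nat.not_lt_zero,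
        and_false, if_false]
      exact (map_getD_range PySem.Dict.empty ds).symm
  | cons c cs ih =>
      intro k ds hk
      rw [PySem.List.enumerate_cons, List.foldl_cons,
        show (k : Int) + 1 = ((k + 1 : Nat) : Int) by push_cast; ring,
        ih (k + 1) (aStep ds ((k : Int), c)) (by rw [aStep_length ds k c hk]; omega),
        aStep_length ds k c hk,
        show max (max ds.length (k + 1)) (k + 1 + cs.length)
            = max ds.length (k + (c :: cs).length) by simp only [List.length_cons]; omega]
      apply List.map_congr_left
      intro p hp
      rw [List.mem_range] at hp
      simp only [aStep_getD ds k c hk]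
      by_cases hpk : p = k
      · subst hpk
        rw [if_neg (by omega), if_pos rfl,
          if_pos (⟨le_refl p, by simp only [List.length_cons]; omega⟩ :
            p ≤ p ∧ p - p < (c :: cs).length)]
        simp
      · rw [if_neg hpk]
        by_cases hcond : k + 1 ≤ p ∧ p - (k + 1) < cs.length
        · rw [if_pos hcond,
            if_pos (⟨by omega, by simp only [List.length_cons]; omega⟩ :
              k ≤ p ∧ p - k < (c :: cs).length),
            show p - k = (p - (k + 1)) + 1 by omega]
          simp
        · rw [if_neg hcond, if_neg (by simp only [List.length_cons]; omega)]

lemma maxLen_append_singleton (ws : List String) (w : String) :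
    maxLen (ws ++ [w]) = max (maxLen ws) w.toList.length := by
  simp only [maxLen, List.foldl_append, List.foldl_cons, List.foldl_nil]
  split <;> omega

lemma foldl_max_le (ws : List String) : ∀ (n : Nat),
    n ≤ ws.foldl (fun n w => if w.toList.length > n then w.toList.length else n) n ∧
    ∀ w ∈ ws, w.toList.length ≤
      ws.foldl (fun n w => if w.toList.length > n then w.toList.length else n) n := by
  induction ws with
  | nil => intro n; simp
  | cons v ws ih =>
      intro n
      simp only [List.foldl_cons]
      set m := if v.toList.length > n then v.toList.length else n with hm
      have h1 := ih m
      constructor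
      · have : n ≤ m := by rw [hm]; split <;> omega
        omega
      · intro w hw
        rcases List.mem_cons.mp hw with h | h
        · subst h
          have : w.toList.length ≤ m := by rw [hm]; split <;> omega
          omega
        · exact h1.2 w h

lemma len_le_maxLen (ws : List String) (w : String) (hw : w ∈ ws) :
    w.toList.length ≤ maxLen ws := by
  exact (foldl_max_le ws 0).2 w hw

lemma colDict_append_singleton (ws : List String) (w : String) (p : Nat) :
    colDict (ws ++ [w]) p
    = if p < w.toList.length then bump (colDict ws p) (w.toList.getD p 'A')
      else colDict ws p := by
  simp [colDict, List.foldl_append]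

lemma colDict_of_ge (ws : List String) (p : Nat) (h : maxLen ws ≤ p) :
    colDict ws p = PySem.Dict.empty := by
  have key : ∀ (l : List String), (∀ w ∈ l, w.toList.length ≤ p) →
      ∀ d, l.foldl (fun counts w =>
        if p < w.toList.length then bump counts (w.toList.getD p 'A') else counts) d = d := by
    intro l
    induction l with
    | nil => intro _ d; simp
    | cons v l ih =>
        intro hl d
        have hv : ¬ p < v.toList.length := by
          have := hl v (List.mem_cons_self ..)
          omega
        simp only [List.foldl_cons, if_neg hv]
        exact ih (fun w hw => hl w (List.mem_cons_of_mem _ hw)) d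
  exact key ws (fun w hw => le_trans (len_le_maxLen ws w hw) h) _

lemma cols_snoc (ws : List String) (w : String) :
    (PySem.List.enumerate w.toList 0).foldl aStep ((List.range (maxLen ws)).map (colDict ws))
    = (List.range (maxLen (ws ++ [w]))).map (colDict (ws ++ [w])) := by
  rw [show (0 : Int) = ((0 : Nat) : Int) by norm_num,
    inner_eq w.toList 0 ((List.range (maxLen ws)).map (colDict ws)) (by simp)]
  simp only [List.length_map, List.length_range, getD_map_range, Nat.zero_add,
    Nat.sub_zero, Nat.zero_le, true_and]
  rw [maxLen_append_singleton]
  apply List.map_congr_left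
  intro p hp
  rw [List.mem_range] at hp
  rw [colDict_append_singleton]
  by_cases hpm : p < w.toList.length
  · rw [if_pos hpm, if_pos hpm]
    by_cases hpL : p < maxLen ws
    · rw [if_pos hpL]
    · rw [if_neg hpL, colDict_of_ge ws p (by omega)]
  · rw [if_neg hpm, if_neg hpm, if_pos (by omega : p < maxLen ws)]

lemma fold_cols : ∀ (ws us : List String),
    ws.foldl (fun dicts word => (PySem.List.enumerate word.toList 0).foldl aStep dicts)
      ((List.range (maxLen us)).map (colDict us))
    = (List.range (maxLen (us ++ ws))).map (colDict (us ++ ws)) := by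
  intro ws
  induction ws with
  | nil => intro us; simp
  | cons w ws ih =>
      intro us
      have h1 := cols_snoc us w
      have h2 := ih (us ++ [w])
      simp only [List.foldl_cons, h1]
      rw [h2]
      simp

-- ===== VERDICT (by name: the statement is the Claim_ definition above) =====
theorem process_spec : Claim_equal_process := by
  intro words _
  unfold Spec_process process process_alt
  have h0 : ([] : List (PySem.Dict String Int))
      = (List.range (maxLen [])).map (colDict []) := by rfl
  rw [h0, fold_cols words []]
  simp
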